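-- pv_equiv track=rewrite | github.com/bytedance/Video-As-Prompt | finetrainers/data/dataset.py | _build_stage_boundaries
-- ===== SOURCE A (Python) =====
-- from typing import Any, Dict, List, Optional, Tuple, Union, Literal
--
-- def _build_stage_boundaries(schedule: List[Dict[str, int]]) -> List[Tuple[int, int]]:
--     bounds = []
--     cur = 0
--     for st in schedule:
--         start = cur
--         end = cur + st["epochs"]
--         bounds.append((start, end))
--         cur = end
--     return bounds
-- ===== SOURCE B (Python) =====
-- def _build_stage_boundaries(schedule):
--     # Recursive decomposition: boundaries of the tail are computed in the tail's
--     # own coordinate frame (starting at 0), then shifted by the head's epochs.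
--     if not schedule:
--         return []
--     head = schedule[0]["epochs"]
--     rest = _build_stage_boundaries(schedule[1:])
--     return [(0, head)] + [(s + head, e + head) for (s, e) in rest]
-- ===== Notes on version B (the rewrite author's own statement) =====
-- stated objective: alternative
-- what changed: Replaces A's iterative running-cursor loop by structural recursion: the tail's boundaries are built independently in their own coordinate frame starting at 0, then the whole tail result is shifted by the head stage's epochs; no cursor is threaded through the traversal.
import Mathlib
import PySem

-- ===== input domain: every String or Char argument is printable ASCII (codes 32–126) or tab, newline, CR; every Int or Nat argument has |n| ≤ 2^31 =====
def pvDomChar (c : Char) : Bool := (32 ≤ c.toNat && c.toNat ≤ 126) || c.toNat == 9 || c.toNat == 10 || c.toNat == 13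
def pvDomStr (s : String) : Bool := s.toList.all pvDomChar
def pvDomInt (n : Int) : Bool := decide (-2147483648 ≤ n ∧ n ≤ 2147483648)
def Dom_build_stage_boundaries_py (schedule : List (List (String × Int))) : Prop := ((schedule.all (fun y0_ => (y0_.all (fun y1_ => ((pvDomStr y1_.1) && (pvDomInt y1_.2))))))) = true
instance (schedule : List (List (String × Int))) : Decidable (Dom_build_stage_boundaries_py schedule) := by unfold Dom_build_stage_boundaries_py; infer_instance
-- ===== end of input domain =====

-- B replaces A's iterative running-cursor loop by structural recursion that builds the
-- tail's boundaries in their own frame (starting at 0) and shifts them by the head's epochs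
-- (alternative decomposition; not faster).
-- ===== PORT A =====
-- st["epochs"] : first matching key of the association list (KeyError excluded by Pre_)
def build_stage_boundaries_py (schedule : List (List (String × Int))) : List (Int × Int) :=
  (schedule.foldl
    (fun (acc : List (Int × Int) × Int) st =>
      let start := acc.2
      let e := start + (st.lookup "epochs").getD 0
      (acc.1 ++ [(start, e)], e))
    ([], 0)).1

-- ===== PORT B =====
def build_stage_boundaries_py_alt : List (List (String × Int)) → List (Int × Int)
  | [] => []
  | st :: rest =>
    let head := (st.lookup "epochs").getD 0
    (0, head) :: (build_stage_boundaries_py_alt rest).map (fun p => (p.1 + head, p.2 + head))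

-- ===== PRECONDITION & SPEC =====
-- Pre_ excludes schedules in which some stage lacks the key "epochs": there the Python A raises KeyError.
def Pre_build_stage_boundaries_py (schedule : List (List (String × Int))) : Prop :=
  ∀ st ∈ schedule, (st.lookup "epochs").isSome
instance (schedule : List (List (String × Int))) : Decidable (Pre_build_stage_boundaries_py schedule) := by
  unfold Pre_build_stage_boundaries_py; infer_instance
def pvWitness_build_stage_boundaries_py : (List (List (String × Int))) :=
  [[("epochs", 3)], [("epochs", 2), ("name", 0)]]
def Spec_build_stage_boundaries_py (schedule : List (List (String × Int))) (out : List (Int × Int)) : Prop := out = build_stage_boundaries_py_alt schedule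
instance (schedule : List (List (String × Int))) (out : List (Int × Int)) : Decidable (Spec_build_stage_boundaries_py schedule out) := by unfold Spec_build_stage_boundaries_py; infer_instance

-- ===== CLAIM =====
def Claim_equal_build_stage_boundaries_py : Prop := ∀ (schedule : List (List (String × Int))), Dom_build_stage_boundaries_py schedule → Pre_build_stage_boundaries_py schedule → Spec_build_stage_boundaries_py schedule (build_stage_boundaries_py schedule)

-- ===== LEMMAS AND PROOFS =====
def pvEps (st : List (String × Int)) : Int := (st.lookup "epochs").getD 0

-- pure recursion computing A's list of pairs from a cursor
def pvGoA (cur : Int) : List (List (String × Int)) → List (Int × Int)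
  | [] => []
  | st :: rest => (cur, cur + pvEps st) :: pvGoA (cur + pvEps st) rest

lemma pvA_fold (sch : List (List (String × Int))) :
    ∀ (acc : List (Int × Int)) (cur : Int),
    (sch.foldl
      (fun (acc : List (Int × Int) × Int) st =>
        let start := acc.2
        let e := start + (st.lookup "epochs").getD 0
        (acc.1 ++ [(start, e)], e))
      (acc, cur)).1 = acc ++ pvGoA cur sch := by
  induction sch with
  | nil => intro acc cur; simp [pvGoA]
  | cons st rest ih =>
      intro acc cur
      simp only [List.foldl_cons, pvGoA, ih, pvEps]
      simp

-- A's cursor recursion equals B's shifted local recursion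
lemma pvGoA_shift (sch : List (List (String × Int))) :
    ∀ cur : Int,
    pvGoA cur sch = (build_stage_boundaries_py_alt sch).map (fun p => (p.1 + cur, p.2 + cur)) := by
  induction sch with
  | nil => intro cur; simp [pvGoA, build_stage_boundaries_py_alt]
  | cons st rest ih =>
      intro cur
      simp only [pvGoA, build_stage_boundaries_py_alt, ih, List.map_cons, List.map_map]
      refine congrArg₂ List.cons ?_ ?_
      · simp [pvEps]; ring
      · apply List.map_congr_left
        intro p _
        simp [pvEps, Function.comp]
        constructor <;> ring

-- ===== VERDICT =====
theorem build_stage_boundaries_py_spec : Claim_equal_build_stage_boundaries_py := by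
  intro schedule _ _
  show build_stage_boundaries_py schedule = build_stage_boundaries_py_alt schedule
  have hA : build_stage_boundaries_py schedule = pvGoA 0 schedule := by
    unfold build_stage_boundaries_py
    rw [pvA_fold]; simp
  rw [hA, pvGoA_shift]
  simp
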